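-- pv_equiv track=rewrite | github.com/datahub-project/datahub | metadata-ingestion/scripts/docs_config_table.py | priority_value
-- ===== SOURCE A (Python) =====
-- def priority_value(path: str) -> str:
--     # A map of low value tokens to their relative importance
--     low_value_token_map = {
--         "env": "X",
--         "classification": "Y",
--         "profiling": "Y",
--         "stateful_ingestion": "Z",
--     }
--     tokens = path.split(".")
--     for low_value_token in low_value_token_map:
--         if low_value_token in tokens:
--             return low_value_token_map[low_value_token]
--
--     # everything else high-prio
--     return "A"
-- ===== SOURCE B (Python) =====
-- def priority_value(path: str) -> str:
--     # A map of low value tokens to their relative importance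
--     low_value_token_map = {
--         "env": "X",
--         "classification": "Y",
--         "profiling": "Y",
--         "stateful_ingestion": "Z",
--     }
--     return min(
--         (low_value_token_map[t] for t in path.split(".") if t in low_value_token_map),
--         default="A",
--     )
-- ===== Notes on version B (the rewrite author's own statement) =====
-- stated objective: alternative
-- what changed: A scans the fixed priority map in order and returns on the first key present among the tokens; B instead reduces the path's tokens to the minimum letter of the matched tokens (default 'A'), correct because the map's insertion order coincides with the alphabetical order of its letters X<Y<Y<Z<A-default.
import Mathlib
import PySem

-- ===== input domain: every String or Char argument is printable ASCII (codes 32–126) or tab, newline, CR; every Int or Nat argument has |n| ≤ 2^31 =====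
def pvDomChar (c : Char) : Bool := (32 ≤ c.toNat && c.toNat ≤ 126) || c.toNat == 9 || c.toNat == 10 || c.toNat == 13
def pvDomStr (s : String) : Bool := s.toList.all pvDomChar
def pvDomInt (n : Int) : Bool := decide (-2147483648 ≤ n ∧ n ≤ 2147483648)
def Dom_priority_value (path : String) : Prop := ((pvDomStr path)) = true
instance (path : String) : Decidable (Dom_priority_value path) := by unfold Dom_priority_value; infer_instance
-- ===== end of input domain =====

-- B replaces A's first-hit scan of the fixed priority map by a min-reduction over the
-- matched tokens' letters (default "A"); objective: alternative decomposition, same cost.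

-- ===== PORT A =====
-- the literal dict of A / B, as an association list in insertion order
def pvMap_priority_value : List (String × String) :=
  [("env", "X"), ("classification", "Y"), ("profiling", "Y"), ("stateful_ingestion", "Z")]

-- A's loop: for each map key in order, return its value on first membership hit
def pvScan_priority_value : List (String × String) → List String → String
  | [], _ => "A"
  | (k, v) :: rest, toks => if k ∈ toks then v else pvScan_priority_value rest toks

def priority_value (path : String) : String :=
  pvScan_priority_value pvMap_priority_value ((PySem.Str.split? path ".").getD [])

-- ===== PORT B =====
-- B: min((m[t] for t in path.split(".") if t in m), default="A")
def priority_value_alt (path : String) : String :=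
  match PySem.List.min?
      (((PySem.Str.split? path ".").getD []).filterMap
        (fun t => (PySem.Dict.ofList pvMap_priority_value).get? t))
      (fun v => v) with
  | some m => m
  | none => "A"

-- ===== PRECONDITION & SPEC =====
def Spec_priority_value (path : String) (out : String) : Prop := out = priority_value_alt path
instance (path : String) (out : String) : Decidable (Spec_priority_value path out) := by unfold Spec_priority_value; infer_instance

-- ===== CLAIM (what is proved, stated in full; the proofs are below) =====
def Claim_equal_priority_value : Prop := ∀ (path : String), Dom_priority_value path → Spec_priority_value path (priority_value path)

-- ===== LEMMAS AND PROOFS =====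

-- characterization of both sides: the first present map key's letter, as an Option
def pvChr (ts : List String) : Option String :=
  if "env" ∈ ts then some "X"
  else if "classification" ∈ ts ∨ "profiling" ∈ ts then some "Y"
  else if "stateful_ingestion" ∈ ts then some "Z"
  else none

theorem pvScan_eq_chr (ts : List String) :
    pvScan_priority_value pvMap_priority_value ts = (pvChr ts).getD "A" := by
  simp only [pvMap_priority_value, pvScan_priority_value, pvChr]
  split_ifs <;> simp_all

theorem pv_foldl_min_comm (l : List String) (x y : String) :
    l.foldl min (min x y) = min x (l.foldl min y) := by
  induction l generalizing y with
  | nil => rfl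
  | cons z l ih =>
      simp only [List.foldl_cons, min_assoc]
      exact ih (min y z)

theorem pv_min?_cons (x : String) (l : List String) :
    PySem.List.min? (x :: l) (fun v => v) =
      some ((PySem.List.min? l (fun v => v)).elim x (min x)) := by
  cases l with
  | nil =>
      have h0 : PySem.List.min? ([] : List String) (fun v => v) = none := by
        simp [PySem.List.min?_eq_none_iff]
      simp [PySem.List.min?_id_cons, h0]
  | cons h t =>
      rw [PySem.List.min?_id_cons, PySem.List.min?_id_cons]
      simp only [List.foldl_cons, Option.elim]
      rw [pv_foldl_min_comm]

def pvLook (t : String) : Option String := (PySem.Dict.ofList pvMap_priority_value).get? t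

theorem pvLook_eq (t : String) :
    pvLook t = if t = "env" then some "X"
      else if t = "classification" then some "Y"
      else if t = "profiling" then some "Y"
      else if t = "stateful_ingestion" then some "Z"
      else none := by
  by_cases he : t = "env"
  · subst he; decide
  by_cases hc : t = "classification"
  · subst hc; decide
  by_cases hp : t = "profiling"
  · subst hp; decide
  by_cases hs : t = "stateful_ingestion"
  · subst hs; decide
  rw [pvLook, show PySem.Dict.ofList pvMap_priority_value = PySem.Dict.mk pvMap_priority_value from by decide]
  simp [pvMap_priority_value, PySem.Dict.get?,
        Ne.symm he, Ne.symm hc, Ne.symm hp, Ne.symm hs, he, hc, hp, hs]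

theorem pv_min_eq_chr (ts : List String) :
    PySem.List.min? (ts.filterMap pvLook) (fun v => v) = pvChr ts := by
  induction ts with
  | nil => simp [pvChr]
  | cons t rest ih =>
      by_cases h1 : t = "env"
      · subst h1
        rw [show (("env" :: rest).filterMap pvLook) = "X" :: rest.filterMap pvLook by
              simp [pvLook_eq]]
        rw [pv_min?_cons, ih]
        have : pvChr ("env" :: rest) = some "X" := by simp [pvChr]
        rw [this]
        simp only [pvChr]
        split_ifs <;> simp <;> decide
      · by_cases h2 : t = "classification"
        · subst h2
          rw [show (("classification" :: rest).filterMap pvLook) = "Y" :: rest.filterMap pvLook by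
                simp [pvLook_eq]]
          rw [pv_min?_cons, ih]
          simp only [pvChr, List.mem_cons]
          split_ifs <;> simp_all <;> decide
        · by_cases h3 : t = "profiling"
          · subst h3
            rw [show (("profiling" :: rest).filterMap pvLook) = "Y" :: rest.filterMap pvLook by
                  simp [pvLook_eq]]
            rw [pv_min?_cons, ih]
            simp only [pvChr, List.mem_cons]
            split_ifs <;> simp_all <;> decide
          · by_cases h4 : t = "stateful_ingestion"
            · subst h4
              rw [show (("stateful_ingestion" :: rest).filterMap pvLook) = "Z" :: rest.filterMap pvLook by
                    simp [pvLook_eq]]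
              rw [pv_min?_cons, ih]
              simp only [pvChr, List.mem_cons]
              split_ifs <;> simp_all <;> decide
            · rw [show ((t :: rest).filterMap pvLook) = rest.filterMap pvLook by
                    simp [pvLook_eq, h1, h2, h3, h4]]
              rw [ih]
              simp [pvChr, List.mem_cons, Ne.symm h1, Ne.symm h2, Ne.symm h3, Ne.symm h4]

-- ===== VERDICT (by name: the statement is the Claim_ definition above) =====
theorem priority_value_spec : Claim_equal_priority_value := by
  intro path _
  unfold Spec_priority_value priority_value priority_value_alt
  rw [pvScan_eq_chr]
  have hm := pv_min_eq_chr ((PySem.Str.split? path ".").getD [])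
  simp only [pvLook] at hm
  rw [hm]
  cases pvChr ((PySem.Str.split? path ".").getD []) <;> rfl
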